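-- pv_equiv track=rewrite | github.com/mertefesensoy/Prompt-Injection-Tester | tools/xref_forensics.py | _decode_array_text
-- ===== SOURCE A (Python) =====
-- def _decode_pdf_string(s: str) -> str:
--     """Decode a PDF literal string token to Unicode."""
--     inner = s[1:-1]  # strip ( )
--     # basic backslash escapes
--     result = []
--     i = 0
--     while i < len(inner):
--         if inner[i] == "\\" and i + 1 < len(inner):
--             c = inner[i + 1]
--             if c == "n":  result.append("\n"); i += 2; continue
--             if c == "r":  result.append("\r"); i += 2; continue
--             if c == "t":  result.append("\t"); i += 2; continue
--             if c.isdigit():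
--                 oct_str = inner[i+1:i+4]
--                 oct_str = "".join(x for x in oct_str if x.isdigit())[:3]
--                 result.append(chr(int(oct_str, 8)))
--                 i += 1 + len(oct_str); continue
--         result.append(inner[i]); i += 1
--     return "".join(result)
--
-- def _decode_hex_string(s: str) -> str:
--     """Decode a PDF hex string <...> to Unicode."""
--     inner = s[1:-1].replace(" ", "").replace("\n", "")
--     if len(inner) % 2:
--         inner += "0"
--     try:
--         raw_bytes = bytes.fromhex(inner)
--         return raw_bytes.decode("latin-1", errors="replace")
--     except ValueError:
--         return ""
--
-- def _decode_array_text(s: str) -> str: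
--     """Extract text content from a TJ array token."""
--     parts = []
--     i = 1  # skip [
--     while i < len(s) - 1:
--         if s[i] == "(":
--             end = i + 1
--             while end < len(s) and s[end] != ")" :
--                 if s[end] == "\\":
--                     end += 1
--                 end += 1
--             parts.append(_decode_pdf_string(s[i:end+1]))
--             i = end + 1
--         elif s[i] == "<":
--             end = s.index(">", i)
--             parts.append(_decode_hex_string(s[i:end+1]))
--             i = end + 1
--         else:
--             i += 1
--     return "".join(parts)
-- ===== SOURCE B (Python) =====
-- import re
--
-- def _decode_pdf_string(s: str) -> str:
--     """Decode a PDF literal string token to Unicode."""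
--     inner = s[1:-1]  # strip ( )
--     # basic backslash escapes
--     result = []
--     i = 0
--     while i < len(inner):
--         if inner[i] == "\\" and i + 1 < len(inner):
--             c = inner[i + 1]
--             if c == "n":  result.append("\n"); i += 2; continue
--             if c == "r":  result.append("\r"); i += 2; continue
--             if c == "t":  result.append("\t"); i += 2; continue
--             if c.isdigit():
--                 oct_str = inner[i+1:i+4]
--                 oct_str = "".join(x for x in oct_str if x.isdigit())[:3]
--                 result.append(chr(int(oct_str, 8)))
--                 i += 1 + len(oct_str); continue
--         result.append(inner[i]); i += 1
--     return "".join(result)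
--
-- def _decode_hex_string(s: str) -> str:
--     """Decode a PDF hex string <...> to Unicode."""
--     inner = s[1:-1].replace(" ", "").replace("\n", "")
--     if len(inner) % 2:
--         inner += "0"
--     try:
--         raw_bytes = bytes.fromhex(inner)
--         return raw_bytes.decode("latin-1", errors="replace")
--     except ValueError:
--         return ""
--
-- # A literal string runs from '(' to the first unescaped ')' (a backslash hides the
-- # next character), or to the end of the token if unterminated; a hex string runs
-- # from '<' to the first '>'.
-- _TOKEN = re.compile(r"\((?:\\[\s\S]|[^\\)])*(?:\)|\\?\Z)|<[^>]*>")
--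
-- def _decode_array_text(s: str) -> str:
--     """Extract text content from a TJ array token."""
--     return "".join(
--         _decode_pdf_string(m.group()) if m.group().startswith("(")
--         else _decode_hex_string(m.group())
--         for m in _TOKEN.finditer(s, 1)  # skip the leading [
--     )
-- ===== Notes on version B (the rewrite author's own statement) =====
-- stated objective: faster
-- what changed: Replaces A's manual cursor/state-machine index scan with a compiled regex that alternates a literal-string pattern and a hex-string pattern and joins the decoded matches (the C-level regex engine does the scanning); the two decode helpers are kept verbatim.
-- outside the precondition, e.g. on _decode_array_text('[(<]'): A returns '<', B returns '<'; on _decode_array_text('[\\9]'): A returns '', B returns ''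
import Mathlib
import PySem

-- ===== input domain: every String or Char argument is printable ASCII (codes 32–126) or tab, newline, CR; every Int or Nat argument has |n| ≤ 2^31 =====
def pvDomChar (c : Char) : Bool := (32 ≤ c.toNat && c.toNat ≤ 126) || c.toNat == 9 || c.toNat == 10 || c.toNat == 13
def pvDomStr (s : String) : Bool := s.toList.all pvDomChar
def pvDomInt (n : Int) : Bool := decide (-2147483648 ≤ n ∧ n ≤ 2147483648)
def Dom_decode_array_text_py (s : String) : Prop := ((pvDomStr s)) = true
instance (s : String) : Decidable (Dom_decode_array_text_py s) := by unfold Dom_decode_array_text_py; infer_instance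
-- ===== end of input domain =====

-- B replaces A's manual cursor/state-machine scan of the TJ array by a regex tokenizer
-- (compiled alternation literal-string | hex-string, iterated over the matches); measured
-- faster (C-level regex scan, same O(n)). The two decode helpers are kept verbatim by
-- Source B, so both ports share their single transliterations below.

-- ===== SHARED DECODE HELPERS (identical in Source A and Source B) =====

-- int(oct_str, 8) on a nonempty string of decimal digits; none = ValueError (a digit above seven)
def pvParseOct : Nat → List Char → Option Nat
  | acc, [] => some acc
  | acc, c :: r => if '0' ≤ c ∧ c ≤ '7' then pvParseOct (acc * 8 + (c.toNat - 48)) r else none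

-- the `while i < len(inner)` loop of _decode_pdf_string
def pvPdfLoop (inner : List Char) (i : Nat) (acc : List Char) : List Char :=
  if h : i < inner.length then
    if h2 : inner[i] = '\\' ∧ i + 1 < inner.length then
      let c := inner[i+1]'h2.2
      if c = 'n' then pvPdfLoop inner (i+2) (acc ++ ['\n'])
      else if c = 'r' then pvPdfLoop inner (i+2) (acc ++ ['\r'])
      else if c = 't' then pvPdfLoop inner (i+2) (acc ++ ['\t'])
      else if c.isDigit then
        -- oct_str = "".join(x for x in inner[i+1:i+4] if x.isdigit())[:3]
        let w := (((inner.drop (i+1)).take 3).filter Char.isDigit).take 3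
        match pvParseOct 0 w with
        | some v => pvPdfLoop inner (i + 1 + w.length) (acc ++ [Char.ofNat v])
        | none => acc  -- int(oct_str, 8) raises ValueError here (outside Pre_)
      else pvPdfLoop inner (i+1) (acc ++ [inner[i]])
    else pvPdfLoop inner (i+1) (acc ++ [inner[i]])
  else acc
termination_by inner.length - i
decreasing_by all_goals omega

-- _decode_pdf_string; inner = s[1:-1] is (cs.drop 1).dropLast for every length
def decode_pdf_string (cs : List Char) : List Char := pvPdfLoop ((cs.drop 1).dropLast) 0 []

def pvIsHexDigit (c : Char) : Bool := c.isDigit || ('a' ≤ c && c ≤ 'f') || ('A' ≤ c && c ≤ 'F')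
def pvHexVal (c : Char) : Nat := if c.isDigit then c.toNat - 48 else if 'a' ≤ c then c.toNat - 87 else c.toNat - 55
-- ASCII whitespace skipped between byte pairs by bytes.fromhex (Python 3.11)
def pvIsPyWS (c : Char) : Bool := c == ' ' || c == '\t' || c == '\n' || c == '\r' || c == Char.ofNat 11 || c == Char.ofNat 12

-- bytes.fromhex: whitespace allowed between byte pairs, two hex digits per byte; none = ValueError
def pvFromHex? : List Char → Option (List Nat)
  | [] => some []
  | c :: r =>
    if pvIsPyWS c then pvFromHex? r
    else match r with
      | d :: r' =>
        if pvIsHexDigit c ∧ pvIsHexDigit d then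
          (pvFromHex? r').map (fun bs => (pvHexVal c * 16 + pvHexVal d) :: bs)
        else none
      | [] => none
termination_by cs => cs.length
decreasing_by all_goals simp <;> omega

-- _decode_hex_string; latin-1 maps byte b to code point b
def decode_hex_string (cs : List Char) : List Char :=
  let inner0 := ((cs.drop 1).dropLast).filter (fun c => c != ' ' && c != '\n')
  let inner := if inner0.length % 2 = 1 then inner0 ++ ['0'] else inner0
  match pvFromHex? inner with
  | some bs => bs.map Char.ofNat
  | none => []

-- ===== PORT A =====

-- the inner `end` loop of the '(' branch: first unescaped ')' from e (backslash skips a char)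
def pvScanLitEnd (cs : List Char) (e : Nat) : Nat :=
  if h : e < cs.length then
    if cs[e] = ')' then e
    else if cs[e] = '\\' then pvScanLitEnd cs (e+2)
    else pvScanLitEnd cs (e+1)
  else e
termination_by cs.length - e
decreasing_by all_goals omega

theorem pvScanLitEnd_ge (cs : List Char) (e : Nat) : e ≤ pvScanLitEnd cs e := by
  fun_induction pvScanLitEnd <;> omega

-- s.index(">", j): first '>' at position ≥ j; none = ValueError
def pvFindGt (cs : List Char) (j : Nat) : Option Nat :=
  if h : j < cs.length then (if cs[j] = '>' then some j else pvFindGt cs (j+1)) else none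
termination_by cs.length - j
decreasing_by all_goals omega

theorem pvFindGt_bounds (cs : List Char) (j : Nat) {k : Nat} (h : pvFindGt cs j = some k) :
    j ≤ k ∧ k < cs.length := by
  fun_induction pvFindGt <;> simp_all <;> omega

-- the main `while i < len(s) - 1` cursor loop of _decode_array_text
def pvALoop (cs : List Char) (i : Nat) (acc : List Char) : List Char :=
  if hg : i + 1 < cs.length then  -- Python: i < len(s) - 1
    if cs[i]'(by omega) = '(' then
      let e := pvScanLitEnd cs (i+1)
      -- s[i:end+1] = (cs.drop i).take (e+1-i) (i ≥ 0; take clamps past the end as Python does)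
      pvALoop cs (e+1) (acc ++ decode_pdf_string ((cs.drop i).take (e + 1 - i)))
    else if cs[i]'(by omega) = '<' then
      match hf : pvFindGt cs i with
      | some e => pvALoop cs (e+1) (acc ++ decode_hex_string ((cs.drop i).take (e + 1 - i)))
      | none => acc  -- s.index raises ValueError here (outside Pre_)
    else pvALoop cs (i+1) acc
  else acc
termination_by cs.length - i
decreasing_by
  · have := pvScanLitEnd_ge cs (i+1); omega
  · have := (pvFindGt_bounds cs i hf).1; omega
  · omega

def decode_array_text_py (s : String) : String := String.ofList (pvALoop s.toList 1 [])

-- ===== PORT B =====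

-- one match of the literal-string branch r"\((?:\\[\s\S]|[^\\)])*(?:\)|\\?\Z)" after the '(':
-- (consumed characters including the terminator, rest of the input)
def pvMunch : List Char → List Char × List Char
  | [] => ([], [])
  | ')' :: r => ([')'], r)
  | '\\' :: [] => (['\\'], [])
  | '\\' :: c :: r => ('\\' :: c :: (pvMunch r).1, (pvMunch r).2)
  | c :: r => (c :: (pvMunch r).1, (pvMunch r).2)

theorem pvMunch_snd_length (r : List Char) : (pvMunch r).2.length ≤ r.length := by
  fun_induction pvMunch <;> simp_all <;> omega

-- one match of the hex-string branch r"<[^>]*>" after the '<'; none = no match here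
def pvHexSplit : List Char → Option (List Char × List Char)
  | [] => none
  | c :: r =>
    if c = '>' then some ([c], r)
    else match pvHexSplit r with
      | some (t, rest) => some (c :: t, rest)
      | none => none

theorem pvHexSplit_snd_length (r : List Char) {t rest : List Char}
    (h : pvHexSplit r = some (t, rest)) : rest.length ≤ r.length := by
  induction r generalizing t rest with
  | nil => simp [pvHexSplit] at h
  | cons c r ih =>
    by_cases hc : c = '>'
    · simp [pvHexSplit, hc] at h; simp [← h.2]
    · simp only [pvHexSplit, if_neg hc] at h
      cases hs : pvHexSplit r with
      | none => rw [hs] at h; simp at h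
      | some p =>
        obtain ⟨t', rest'⟩ := p
        rw [hs] at h; simp at h
        have := ih hs
        simp [← h.2] at this ⊢; omega

-- iterate _TOKEN.finditer: at each position try a literal match, then a hex match, else advance
def pvBScan (cs : List Char) : List Char :=
  match cs with
  | [] => []
  | c :: r =>
    if c = '(' then
      decode_pdf_string ('(' :: (pvMunch r).1) ++ pvBScan (pvMunch r).2
    else if c = '<' then
      match hh : pvHexSplit r with
      | some (t, rest) => decode_hex_string ('<' :: t) ++ pvBScan rest
      | none => pvBScan r
    else pvBScan r
termination_by cs.length
decreasing_by
  · have := pvMunch_snd_length r; simp; omega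
  · have := pvHexSplit_snd_length r hh; simp; omega
  · simp
  · simp

def decode_array_text_py_alt (s : String) : String := String.ofList (pvBScan (s.toList.drop 1))

-- ===== PRECONDITION & SPEC =====
-- Pre_ excludes (1) inputs where A raises ValueError — a '<' scanned with no '>' after it, or a
-- backslash-digit octal escape whose 3-char window reaches a digit above seven (int(oct_str, 8) fails) —
-- stated coarsely over raw positions of s, so it also excludes a few inputs where such a pattern
-- sits inside a literal token and A still returns (see cites); B returns the same value there.
def Pre_decode_array_text_py (s : String) : Prop :=
  (∀ j ∈ List.range s.toList.length, 1 ≤ j → j + 1 < s.toList.length → s.toList.getD j ' ' = '<' →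
      ∃ k ∈ List.range s.toList.length, j < k ∧ s.toList.getD k ' ' = '>') ∧
  (∀ j ∈ List.range s.toList.length, j + 1 < s.toList.length → s.toList.getD j ' ' = '\\' →
      (s.toList.getD (j+1) ' ').isDigit = true →
      ∀ d ∈ [1, 2, 3], j + d < s.toList.length →
        s.toList.getD (j+d) ' ' ≠ '8' ∧ s.toList.getD (j+d) ' ' ≠ '9')
instance (s : String) : Decidable (Pre_decode_array_text_py s) := by
  unfold Pre_decode_array_text_py; infer_instance

def pvWitness_decode_array_text_py : String := "[(A\\101) <48 6f>]"

def Spec_decode_array_text_py (s : String) (out : String) : Prop := out = decode_array_text_py_alt s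
instance (s : String) (out : String) : Decidable (Spec_decode_array_text_py s out) := by unfold Spec_decode_array_text_py; infer_instance

-- ===== CLAIM (what is proved, stated in full; the proofs are below) =====
def Claim_equal_decode_array_text_py : Prop := ∀ (s : String), Dom_decode_array_text_py s → Pre_decode_array_text_py s → Spec_decode_array_text_py s (decode_array_text_py s)

-- ===== LEMMAS AND PROOFS =====

theorem pvMunch_cons_cons (c : Char) (r : List Char) :
    pvMunch ('\\' :: c :: r) = ('\\' :: c :: (pvMunch r).1, (pvMunch r).2) := rfl

theorem pvMunch_ne_paren_backslash (c : Char) (r : List Char) (h1 : c ≠ ')') (h2 : c ≠ '\\') :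
    pvMunch (c :: r) = (c :: (pvMunch r).1, (pvMunch r).2) := by
  rcases r with _ | ⟨d, r⟩ <;> simp [pvMunch, h2]

theorem pvMunch_drop (cs : List Char) (e : Nat) :
    pvMunch (cs.drop e) =
      ((cs.drop e).take (pvScanLitEnd cs e + 1 - e), cs.drop (pvScanLitEnd cs e + 1)) := by
  fun_induction pvScanLitEnd cs e with
  | case1 e h hp =>  -- cs[e] = ')'
    rw [List.drop_eq_getElem_cons h, hp]
    have h1 : e + 1 - e = 1 := by omega
    simp [pvMunch, h1]
  | case2 e h hp hb ih =>  -- cs[e] = '\\'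
    by_cases h2 : e + 1 < cs.length
    · have hE := pvScanLitEnd_ge cs (e+2)
      rw [List.drop_eq_getElem_cons h, List.drop_eq_getElem_cons h2, hb] at *
      rw [pvMunch_cons_cons, ih]
      have h3 : pvScanLitEnd cs (e+2) + 1 - e = (pvScanLitEnd cs (e+2) + 1 - (e+2)) + 2 := by omega
      rw [h3]
      simp
      rw [List.drop_eq_getElem_cons h2, List.take_succ_cons]
    · -- the backslash is the last character: the escape runs past the end
      have he1 : e + 1 = cs.length := by omega
      have hdrop1 : cs.drop (e+1) = [] := List.drop_eq_nil_of_le (by omega)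
      rw [List.drop_eq_getElem_cons h, hb, hdrop1]
      have hE : pvScanLitEnd cs (e+2) = e + 2 := by rw [pvScanLitEnd]; simp; omega
      rw [hE]
      have h3 : e + 2 + 1 - e = 3 := by omega
      rw [h3]
      simp [pvMunch, List.drop_eq_nil_of_le (show cs.length ≤ e + 3 by omega)]
  | case3 e h hp hb ih =>  -- ordinary character
    have hE := pvScanLitEnd_ge cs (e+1)
    rw [List.drop_eq_getElem_cons h] at *
    rw [pvMunch_ne_paren_backslash _ _ hp hb, ih]
    have h3 : pvScanLitEnd cs (e+1) + 1 - e = (pvScanLitEnd cs (e+1) + 1 - (e+1)) + 1 := by omega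
    rw [h3]
    simp
    rw [List.drop_eq_getElem_cons h, List.take_succ_cons]
  | case4 e h =>
    rw [List.drop_eq_nil_of_le (by omega), List.drop_eq_nil_of_le (by omega)]
    simp [pvMunch]

theorem pvHexSplit_drop (cs : List Char) (j : Nat) {k : Nat} (h : pvFindGt cs j = some k) :
    pvHexSplit (cs.drop j) = some ((cs.drop j).take (k + 1 - j), cs.drop (k + 1)) := by
  fun_induction pvFindGt cs j with
  | case1 j hj hgt =>
    rw [Option.some_inj] at h
    subst h
    rw [List.drop_eq_getElem_cons hj, hgt]
    have h1 : j + 1 - j = 1 := by omega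
    simp [pvHexSplit, h1]
  | case2 j hj hgt ih =>
    have hb := pvFindGt_bounds cs (j+1) h
    have ihh := ih h
    rw [List.drop_eq_getElem_cons hj]
    rw [pvHexSplit, if_neg hgt, ihh]
    have h1 : k + 1 - j = (k + 1 - (j + 1)) + 1 := by omega
    rw [h1, List.take_succ_cons]
  | case3 j hj => simp at h

theorem pvFindGt_isSome (cs : List Char) (j : Nat)
    (h : ∃ k, k < cs.length ∧ j ≤ k ∧ cs.getD k ' ' = '>') :
    ∃ k', pvFindGt cs j = some k' := by
  fun_induction pvFindGt cs j with
  | case1 j hj hgt => exact ⟨j, rfl⟩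
  | case2 j hj hgt ih =>
    apply ih
    obtain ⟨k, hk, hjk, hc⟩ := h
    refine ⟨k, hk, ?_, hc⟩
    rcases Nat.eq_or_lt_of_le hjk with rfl | hlt
    · exact absurd (by rw [List.getD_eq_getElem _ _ hk] at hc; exact hc) hgt
    · omega
  | case3 j hj =>
    obtain ⟨k, hk, hjk, _⟩ := h
    omega

theorem pvBScan_nil : pvBScan [] = [] := by rw [pvBScan]

theorem pvBScan_cons_paren (r : List Char) :
    pvBScan ('(' :: r) = decode_pdf_string ('(' :: (pvMunch r).1) ++ pvBScan (pvMunch r).2 := by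
  rw [pvBScan, if_pos rfl]

theorem pvBScan_cons_hex_some (r t rest : List Char) (h : pvHexSplit r = some (t, rest)) :
    pvBScan ('<' :: r) = decode_hex_string ('<' :: t) ++ pvBScan rest := by
  rw [pvBScan, if_neg (by decide), if_pos rfl]
  split
  next t' rest' heq => rw [h] at heq; injection heq with heq'; injection heq' with h1 h2; rw [h1, h2]
  next heq => rw [h] at heq; exact absurd heq (by simp)

theorem pvBScan_cons_other (c : Char) (r : List Char) (h1 : c ≠ '(') (h2 : c ≠ '<') :
    pvBScan (c :: r) = pvBScan r := by
  rw [pvBScan, if_neg h1, if_neg h2]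

theorem pvBScan_single (c : Char) : pvBScan [c] = [] := by
  rw [pvBScan]
  split_ifs with h1 h2
  · simp [pvMunch, decode_pdf_string, pvPdfLoop, pvBScan_nil]
  · simp [pvHexSplit, pvBScan_nil]
  · exact pvBScan_nil

theorem pvMain (cs : List Char)
    (H : ∀ j, j < cs.length → 1 ≤ j → j + 1 < cs.length → cs.getD j ' ' = '<' →
        ∃ k, k < cs.length ∧ j < k ∧ cs.getD k ' ' = '>') :
    ∀ n i acc, cs.length - i ≤ n → 1 ≤ i → pvALoop cs i acc = acc ++ pvBScan (cs.drop i) := by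
  intro n
  induction n with
  | zero =>
    intro i acc h0 _h1
    rw [pvALoop, dif_neg (by omega), List.drop_eq_nil_of_le (by omega), pvBScan_nil]
    simp
  | succ n ih =>
    intro i acc hn h1
    rw [pvALoop]
    by_cases hg : i + 1 < cs.length
    · have hi : i < cs.length := by omega
      rw [dif_pos hg]
      by_cases hp : cs[i] = '('
      · rw [if_pos hp]
        have hE := pvScanLitEnd_ge cs (i + 1)
        rw [ih (pvScanLitEnd cs (i+1) + 1) _ (by omega) (by omega)]
        conv_rhs => rw [List.drop_eq_getElem_cons hi, hp]
        rw [pvBScan_cons_paren, pvMunch_drop cs (i + 1)]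
        have htok : ('(' : Char) :: List.take (pvScanLitEnd cs (i+1) + 1 - (i + 1)) (List.drop (i + 1) cs)
            = List.take (pvScanLitEnd cs (i+1) + 1 - i) (List.drop i cs) := by
          rw [List.drop_eq_getElem_cons hi, hp]
          have h3 : pvScanLitEnd cs (i+1) + 1 - i = (pvScanLitEnd cs (i+1) + 1 - (i + 1)) + 1 := by omega
          rw [h3, List.take_succ_cons]
        simp only [htok, List.append_assoc]
      · by_cases hx : cs[i] = '<'
        · rw [if_neg hp, if_pos hx]
          have hgetd : cs.getD i ' ' = '<' := by rw [List.getD_eq_getElem _ _ hi]; exact hx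
          obtain ⟨k, hk, hik, hkc⟩ := H i hi h1 hg hgetd
          split
          next e heq =>
            have he : pvFindGt cs (i + 1) = some e := by
              rw [pvFindGt, dif_pos hi, if_neg (by rw [hx]; decide)] at heq
              exact heq
            have hb := pvFindGt_bounds cs (i + 1) he
            rw [ih (e + 1) _ (by omega) (by omega)]
            conv_rhs => rw [List.drop_eq_getElem_cons hi, hx]
            rw [pvBScan_cons_hex_some _ _ _ (pvHexSplit_drop cs (i + 1) he)]
            have htok : ('<' : Char) :: List.take (e + 1 - (i + 1)) (List.drop (i + 1) cs)
                = List.take (e + 1 - i) (List.drop i cs) := by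
              rw [List.drop_eq_getElem_cons hi, hx]
              have h3 : e + 1 - i = (e + 1 - (i + 1)) + 1 := by omega
              rw [h3, List.take_succ_cons]
            simp only [htok, List.append_assoc]
          next heq =>
            obtain ⟨k', hk'⟩ := pvFindGt_isSome cs i ⟨k, hk, by omega, hkc⟩
            rw [heq] at hk'
            exact absurd hk' (by simp)
        · rw [if_neg hp, if_neg hx]
          rw [ih (i + 1) acc (by omega) (by omega)]
          conv_rhs => rw [List.drop_eq_getElem_cons hi]
          rw [pvBScan_cons_other _ _ hp hx]
    · rw [dif_neg hg]
      by_cases hlen : cs.length ≤ i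
      · rw [List.drop_eq_nil_of_le hlen, pvBScan_nil]; simp
      · have hi : i < cs.length := by omega
        have hone : cs.drop i = [cs[i]] := by
          rw [List.drop_eq_getElem_cons hi, List.drop_eq_nil_of_le (by omega)]
        rw [hone, pvBScan_single]
        simp

-- ===== VERDICT (by name: the statement is the Claim_ definition above) =====
theorem decode_array_text_py_spec : Claim_equal_decode_array_text_py := by
  intro s _hdom hpre
  unfold Spec_decode_array_text_py decode_array_text_py decode_array_text_py_alt
  have H : ∀ j, j < s.toList.length → 1 ≤ j → j + 1 < s.toList.length → s.toList.getD j ' ' = '<' →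
      ∃ k, k < s.toList.length ∧ j < k ∧ s.toList.getD k ' ' = '>' := by
    intro j hj h1 h2 h3
    rcases hpre.1 j (by simpa using hj) h1 h2 h3 with ⟨k, hk, hjk, hgt⟩
    exact ⟨k, by simpa using hk, hjk, hgt⟩
  have := pvMain s.toList H s.toList.length 1 [] (by omega) (by omega)
  rw [this, List.nil_append]
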